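-- pv_equiv track=rewrite | github.com/bruno-borges-2001/Analisador | AnalisadorLexico/lexical_analyzer.py | get_char_coords
-- ===== SOURCE A (Python) =====
-- def get_char_coords(text, i):
--     row = 1
--     column = 0
--     count = 0
--     while count != i:
--         if text[count] == "\n":
--             count += 1
--             row += 1
--             column = 0
--         else:
--             count += 1
--             column += 1
--     return (row, column)
-- ===== SOURCE B (Python) =====
-- def get_char_coords(text, i):
--     if i < 0 or i > len(text):
--         raise IndexError("string index out of range")
--     parts = text[:i].split("\n")
--     return (len(parts), len(parts[-1]))
-- ===== Notes on version B (the rewrite author's own statement) =====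
-- stated objective: idiomatic
-- what changed: Replaces the hand-rolled stateful while-loop over character indices by one prefix slice split on newlines (row = number of pieces, column = length of the last piece), moving the scan into C-level str methods.
import Mathlib
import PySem

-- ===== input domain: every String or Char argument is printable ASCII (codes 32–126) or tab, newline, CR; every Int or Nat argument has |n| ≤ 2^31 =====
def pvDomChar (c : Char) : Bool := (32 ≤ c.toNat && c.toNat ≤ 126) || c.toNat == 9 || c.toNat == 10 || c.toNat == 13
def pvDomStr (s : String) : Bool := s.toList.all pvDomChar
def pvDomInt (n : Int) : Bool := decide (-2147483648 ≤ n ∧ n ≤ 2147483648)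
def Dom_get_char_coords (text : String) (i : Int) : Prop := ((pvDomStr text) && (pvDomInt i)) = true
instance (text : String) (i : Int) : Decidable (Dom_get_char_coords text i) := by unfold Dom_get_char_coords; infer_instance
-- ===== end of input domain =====

-- B replaces A's hand-rolled stateful while-loop by splitting the prefix text[:i] on
-- newlines (row = number of pieces, column = length of the last piece); same values and
-- same IndexError on out-of-range i (Pre_ excludes those raising inputs).

-- ===== PORT A =====
-- the while-loop of A, fuel = number of remaining iterations (exactly i-count under Pre_)
def gccLoop (cs : List Char) (i : Int) (fuel : Nat) (count row column : Int) : Int × Int :=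
  match fuel with
  | 0 => (row, column)
  | Nat.succ f =>
    if count = i then (row, column)
    else
      match PySem.List.pyGet? cs count with
      | none => (row, column)   -- Python raises IndexError here; unreachable under Pre_
      | some c =>
        if c = '\n' then gccLoop cs i f (count + 1) (row + 1) 0
        else gccLoop cs i f (count + 1) row (column + 1)

def get_char_coords (text : String) (i : Int) : Int × Int :=
  gccLoop text.toList i i.toNat 0 1 0

-- ===== PORT B =====
def get_char_coords_alt (text : String) (i : Int) : Int × Int :=
  if i < 0 ∨ (text.toList.length : Int) < i then (0, 0)  -- Python B raises IndexError here (outside Pre_)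
  else
  let parts := PySem.Chars.splitOn (PySem.List.slice text.toList none (some i)) ['\n']
  ((parts.length : Int), (((PySem.List.pyGet? parts (-1)).getD []).length : Int))
  -- parts[-1]: split always returns a nonempty list, so pyGet? is some; getD [] is unreachable

-- ===== PRECONDITION & SPEC =====
-- Pre_ excludes exactly the indices on which A raises IndexError (i < 0 or i > len(text))
def Pre_get_char_coords (text : String) (i : Int) : Prop :=
  0 ≤ i ∧ i ≤ text.toList.length
instance (text : String) (i : Int) : Decidable (Pre_get_char_coords text i) := by
  unfold Pre_get_char_coords; infer_instance

def pvWitness_get_char_coords : String × Int := ("a\nb", 3)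

def Spec_get_char_coords (text : String) (i : Int) (out : Int × Int) : Prop :=
  out = get_char_coords_alt text i
instance (text : String) (i : Int) (out : Int × Int) : Decidable (Spec_get_char_coords text i out) := by
  unfold Spec_get_char_coords; infer_instance

-- ===== CLAIM (what is proved, stated in full; the proofs are below) =====
def Claim_equal_get_char_coords : Prop :=
  ∀ (text : String) (i : Int), Dom_get_char_coords text i → Pre_get_char_coords text i →
    Spec_get_char_coords text i (get_char_coords text i)

-- ===== LEMMAS AND PROOFS =====

-- the per-character state update of A's loop
def gccStep (rc : Int × Int) (c : Char) : Int × Int :=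
  if c = '\n' then (rc.1 + 1, 0) else (rc.1, rc.2 + 1)

-- length of the run of non-newline characters at the end of p (the column of position |p|)
def gccTail (p : List Char) : Nat := (p.reverse.takeWhile (fun c => !(c == '\n'))).length

-- the pieces of pre ++ l where only l is still to be split (mirrors splitOn.go's state)
def gccPieces (pre : List Char) : List Char → List (List Char)
  | [] => [pre]
  | c :: rest => if c = '\n' then pre :: gccPieces [] rest else gccPieces (pre ++ [c]) rest

lemma gccLoop_eq_foldl (cs : List Char) (i : Int) :
    ∀ (n k : Nat) (row col : Int), i = (k + n : Nat) → (k + n : Nat) ≤ cs.length →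
      gccLoop cs i n k row col = ((cs.drop k).take n).foldl gccStep (row, col) := by
  intro n
  induction n with
  | zero =>
    intro k row col hi _
    simp [gccLoop]
  | succ m ih =>
    intro k row col hi hlen
    have hk : k < cs.length := by omega
    have hne : (k : Int) ≠ i := by omega
    have hget : PySem.List.pyGet? cs (k : Int) = some (cs.get ⟨k, hk⟩) := by
      simp [PySem.List.pyGet?, PySem.List.pyIdx?, hk]
    have hdrop : cs.drop k = cs.get ⟨k, hk⟩ :: cs.drop (k + 1) := by
      rw [List.drop_eq_getElem_cons hk]; rfl
    have h1 : i = ((k + 1 : Nat) + m : Nat) := by push_cast; push_cast at hi; omega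
    have h2 : ((k + 1 : Nat) + m : Nat) ≤ cs.length := by omega
    by_cases hc : cs.get ⟨k, hk⟩ = '\n'
    · simp only [gccLoop, hne, hget, hc]
      have hrec := ih (k + 1) (row + 1) 0 (by exact_mod_cast h1) h2
      rw [show ((k : Int) + 1) = ((k + 1 : Nat) : Int) by push_cast; ring, hrec,
        hdrop, List.take_succ_cons, List.foldl_cons]
      simp only [List.get_eq_getElem] at hc
      simp [gccStep, hc]
    · simp only [gccLoop, hne, hget, if_neg hc]
      have hrec := ih (k + 1) row (col + 1) (by exact_mod_cast h1) h2
      rw [show ((k : Int) + 1) = ((k + 1 : Nat) : Int) by push_cast; ring, hrec,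
        hdrop, List.take_succ_cons, List.foldl_cons]
      simp only [List.get_eq_getElem] at hc
      simp [gccStep, hc]

lemma gccFoldl_closed (p : List Char) :
    ∀ (row col : Int), p.foldl gccStep (row, col) =
      (row + p.count '\n',
       if '\n' ∈ p then (gccTail p : Int) else col + p.length) := by
  induction p using List.reverseRecOn with
  | nil => intro row col; simp [gccTail]
  | append_singleton q c ih =>
    intro row col
    rw [List.foldl_append, ih]
    by_cases hc : c = '\n'
    · subst hc
      simp [gccStep, gccTail, List.count_append]
      ring
    · have hcount : (q ++ [c]).count '\n' = q.count '\n' := by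
        simp [List.count_append, List.count_singleton, hc]
      have htail : gccTail (q ++ [c]) = gccTail q + 1 := by
        simp [gccTail, List.takeWhile_cons, hc]
      have hmem : '\n' ∈ q ++ [c] ↔ '\n' ∈ q := by
        simp [List.mem_append, hc, Ne.symm hc]
      by_cases hm : '\n' ∈ q
      · simp [gccStep, hc, hcount, htail, hmem, hm]
      · have : gccTail q = q.length := by
          unfold gccTail
          rw [List.takeWhile_eq_self_iff.mpr ?_, List.length_reverse]
          intro x hx
          have hx' := List.mem_reverse.mp hx
          simp only [Bool.not_eq_true', beq_eq_false_iff_ne, ne_eq]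
          exact fun h => hm (h ▸ hx')
        simp [gccStep, hc, hcount, htail, hmem, hm, this]
        push_cast
        ring

lemma gccSplitGo (l : List Char) :
    ∀ (fuel : Nat) (cur : List Char) (acc : List (List Char)), l.length ≤ fuel →
      PySem.Chars.splitOn.go ['\n'] fuel l cur acc = acc.reverse ++ gccPieces cur.reverse l := by
  induction l with
  | nil =>
    intro fuel cur acc _
    cases fuel <;> simp [PySem.Chars.splitOn.go, gccPieces]
  | cons c rest ih =>
    intro fuel cur acc hf
    cases fuel with
    | zero => simp at hf
    | succ f =>
      by_cases hc : c = '\n'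
      · subst hc
        have hpre : List.isPrefixOf ['\n'] ('\n' :: rest) = true := by
          simp [List.isPrefixOf]
        simp only [PySem.Chars.splitOn.go, hpre, if_pos]
        rw [show List.drop (['\n'] : List Char).length ('\n' :: rest) = rest from rfl]
        rw [ih f [] (cur.reverse :: acc) (by simpa using Nat.le_of_succ_le_succ hf)]
        simp [gccPieces]
      · have hpre : List.isPrefixOf ['\n'] (c :: rest) = false := by
          simp [List.isPrefixOf]
          exact fun h => hc h.symm
        simp only [PySem.Chars.splitOn.go, hpre, Bool.false_eq_true, if_false]
        rw [ih f (c :: cur) acc (by simpa using Nat.le_of_succ_le_succ hf)]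
        simp [gccPieces, hc]

lemma gccPieces_ne_nil (pre : List Char) (l : List Char) : gccPieces pre l ≠ [] := by
  induction l generalizing pre with
  | nil => simp [gccPieces]
  | cons c rest ih =>
    simp only [gccPieces]
    split <;> simp [ih]

lemma gccPieces_length (l : List Char) :
    ∀ pre, (gccPieces pre l).length = l.count '\n' + 1 := by
  induction l with
  | nil => intro pre; simp [gccPieces]
  | cons c rest ih =>
    intro pre
    by_cases hc : c = '\n'
    · subst hc; simp [gccPieces, ih, List.count_cons]
    · simp [gccPieces, hc, ih, List.count_cons]

lemma gccGetLast?_cons {α : Type} (a : α) (l : List α) (h : l ≠ []) :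
    (a :: l).getLast? = l.getLast? := by
  cases l with
  | nil => exact absurd rfl h
  | cons b t => simp [List.getLast?_cons_cons]

lemma gccTakeWhile_append (l l' : List Char) (h : '\n' ∈ l) :
    (l ++ l').takeWhile (fun c => !(c == '\n')) = l.takeWhile (fun c => !(c == '\n')) := by
  induction l with
  | nil => simp at h
  | cons a t ih =>
    by_cases ha : a = '\n'
    · subst ha; simp [List.takeWhile_cons]
    · have ht : '\n' ∈ t := by
        rcases List.mem_cons.mp h with h1 | h1
        · exact absurd h1.symm ha
        · exact h1
      simp [List.takeWhile_cons, ha, ih ht]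

lemma gccPieces_last (l : List Char) :
    ∀ pre, (gccPieces pre l).getLast? =
      some (if '\n' ∈ l then (l.reverse.takeWhile (fun c => !(c == '\n'))).reverse
            else pre ++ l) := by
  induction l with
  | nil => intro pre; simp [gccPieces]
  | cons c rest ih =>
    intro pre
    by_cases hc : c = '\n'
    · subst hc
      have hstep : gccPieces pre ('\n' :: rest) = pre :: gccPieces [] rest := by
        simp [gccPieces]
      rw [hstep, gccGetLast?_cons _ _ (gccPieces_ne_nil _ _), ih []]
      by_cases hm : '\n' ∈ rest
      · simp [hm, List.reverse_cons,
          gccTakeWhile_append rest.reverse ['\n'] (List.mem_reverse.mpr hm)]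
      · have hall : rest.reverse.takeWhile (fun c => !(c == '\n')) = rest.reverse := by
          rw [List.takeWhile_eq_self_iff]
          intro x hx
          simp only [Bool.not_eq_eq_eq_not, Bool.not_true, beq_eq_false_iff_ne, ne_eq]
          intro h; exact hm (by simpa [h] using (List.mem_reverse.mp hx))
        have htw : (rest.reverse ++ ['\n']).takeWhile (fun c => !(c == '\n')) = rest.reverse := by
          rw [List.takeWhile_append]
          simp [hall]
        simp [hm, List.reverse_cons, htw, hall]
    · simp only [gccPieces]
      rw [if_neg hc, ih (pre ++ [c])]
      by_cases hm : '\n' ∈ rest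
      · simp only [hm, if_pos, List.mem_cons, or_true, if_true, List.reverse_cons]
        rw [gccTakeWhile_append _ [c] (List.mem_reverse.mpr hm)]
      · have hmem : ¬ '\n' ∈ c :: rest := by simp [Ne.symm hc, hm]
        simp [hm, hmem]

lemma pyGet?_neg_one {α : Type} (xs : List α) (h : xs ≠ []) :
    PySem.List.pyGet? xs (-1) = xs.getLast? := by
  have hpos : 0 < xs.length := List.length_pos_iff.mpr h
  have h1 : 1 ≤ xs.length := hpos
  simp [PySem.List.pyGet?, PySem.List.pyIdx?, h1, List.getLast?_eq_getElem?]

lemma gccAlt_closed (text : String) (i : Int) (h0 : 0 ≤ i) (h1 : i ≤ text.toList.length) :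
    get_char_coords_alt text i =
      (((text.toList.take i.toNat).count '\n' : Int) + 1,
       if '\n' ∈ text.toList.take i.toNat then (gccTail (text.toList.take i.toNat) : Int)
       else ((text.toList.take i.toNat).length : Int)) := by
  unfold get_char_coords_alt
  rw [if_neg (by omega)]
  show (((PySem.Chars.splitOn (PySem.List.slice text.toList none (some i)) ['\n']).length : Int),
      (((PySem.List.pyGet? (PySem.Chars.splitOn (PySem.List.slice text.toList none (some i)) ['\n'])
          (-1)).getD []).length : Int)) = _
  rw [PySem.List.slice_to text.toList h0]
  set p := text.toList.take i.toNat with hp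
  have hsplit : PySem.Chars.splitOn p ['\n'] = gccPieces [] p := by
    show PySem.Chars.splitOn.go ['\n'] (p.length + 1) p [] [] = _
    rw [gccSplitGo p (p.length + 1) [] [] (by omega)]
    simp
  simp only [hsplit]
  rw [pyGet?_neg_one _ (gccPieces_ne_nil _ _), gccPieces_last p [], gccPieces_length p []]
  simp only [Option.getD_some]
  by_cases hm : '\n' ∈ p
  · simp [hm, gccTail]
  · simp [hm]

-- ===== VERDICT (by name: the statement is the Claim_ definition above) =====
theorem get_char_coords_spec : Claim_equal_get_char_coords := by
  intro text i _ hpre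
  obtain ⟨h0, h1⟩ := hpre
  unfold Spec_get_char_coords
  unfold get_char_coords
  have hi : i = ((0 + i.toNat : Nat) : Int) := by omega
  have hl := gccLoop_eq_foldl text.toList i i.toNat 0 1 0 (by omega) (by omega)
  simp only [Nat.cast_zero, List.drop_zero] at hl
  rw [hl]
  rw [gccFoldl_closed, gccAlt_closed text i h0 h1]
  by_cases hm : '\n' ∈ text.toList.take i.toNat
  · simp [hm]; ring
  · simp [hm]; ring
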